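-- pv_equiv track=rewrite | github.com/jcob08/Sportsbet | models/build_2025_predictions.py | calc_streaks
-- ===== SOURCE A (Python) =====
-- def calc_streaks(sequence):
--     """Calculate success and failure streaks in a binary sequence"""
--     current_success = 0
--     current_failure = 0
--     longest_success = 0
--     longest_failure = 0
--
--     for outcome in sequence:
--         if outcome == 1:
--             # Success
--             current_success += 1
--             current_failure = 0
--             longest_success = max(longest_success, current_success)
--         else:
--             # Failure
--             current_failure += 1
--             current_success = 0
--             longest_failure = max(longest_failure, current_failure)
--
--     return {
--         'longest_success': longest_success,
--         'longest_failure': longest_failure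
--     }
-- ===== SOURCE B (Python) =====
-- def calc_streaks(sequence):
--     """Calculate success and failure streaks in a binary sequence"""
--     # Build the run structure first, then reduce over it.
--     runs = []  # list of [is_success, length] for maximal runs, in order
--     for outcome in sequence:
--         key = (outcome == 1)
--         if runs and runs[-1][0] == key:
--             runs[-1][1] += 1
--         else:
--             runs.append([key, 1])
--     success_lengths = [n for k, n in runs if k]
--     failure_lengths = [n for k, n in runs if not k]
--     return {
--         'longest_success': max(success_lengths, default=0),
--         'longest_failure': max(failure_lengths, default=0)
--     }
-- ===== Notes on version B (the rewrite author's own statement) =====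
-- stated objective: alternative
-- what changed: B first materialises the maximal-run structure (list of (is_success, length) runs), then takes max over each bucket of run lengths with default 0, instead of threading four running counters through the loop.
import Mathlib
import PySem

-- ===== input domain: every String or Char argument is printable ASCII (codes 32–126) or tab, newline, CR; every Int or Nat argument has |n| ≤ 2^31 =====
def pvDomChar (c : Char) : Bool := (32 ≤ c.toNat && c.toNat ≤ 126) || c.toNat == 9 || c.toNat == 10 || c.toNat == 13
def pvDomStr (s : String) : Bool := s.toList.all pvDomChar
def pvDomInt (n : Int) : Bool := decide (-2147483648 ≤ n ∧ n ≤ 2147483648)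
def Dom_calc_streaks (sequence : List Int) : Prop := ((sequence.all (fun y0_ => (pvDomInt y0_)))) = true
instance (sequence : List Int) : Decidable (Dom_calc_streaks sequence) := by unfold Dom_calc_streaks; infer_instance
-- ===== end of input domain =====

-- B builds the maximal-run structure first and reduces over it, instead of threading
-- four running counters through one loop (objective: alternative decomposition, same cost).

-- ===== PORT A =====
-- A's loop body, threading (current_success, current_failure, longest_success, longest_failure)
def aStep (st : Int × Int × Int × Int) (outcome : Int) : Int × Int × Int × Int :=
  let (cs, cf, ls, lf) := st
  if outcome == 1 then (cs + 1, 0, max ls (cs + 1), lf)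
  else (0, cf + 1, ls, max lf (cf + 1))

def calc_streaks (sequence : List Int) : List (String × Int) :=
  let st := sequence.foldl aStep (0, 0, 0, 0)
  [("longest_success", st.2.2.1), ("longest_failure", st.2.2.2)]

-- ===== PORT B =====
-- B's loop mutates the LAST run of the in-order `runs` list; the port keeps the runs
-- reversed (head = Python's runs[-1]) and reverses at the end — same computation.
def bStep (acc : List (Bool × Int)) (outcome : Int) : List (Bool × Int) :=
  let key := outcome == 1
  match acc with
  | (k, n) :: rest => if k == key then (k, n + 1) :: rest else (key, 1) :: (k, n) :: rest
  | [] => [(key, 1)]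

-- the two bucket comprehensions and the final dict of B
def bCollect (runs : List (Bool × Int)) : List (String × Int) :=
  [("longest_success",
      (PySem.List.max? (runs.filterMap (fun p => if p.1 then some p.2 else none)) (fun y => y)).getD 0),
   ("longest_failure",
      (PySem.List.max? (runs.filterMap (fun p => if p.1 then none else some p.2)) (fun y => y)).getD 0)]

def calc_streaks_alt (sequence : List Int) : List (String × Int) :=
  bCollect ((sequence.foldl bStep []).reverse)

-- ===== PRECONDITION & SPEC =====
def Spec_calc_streaks (sequence : List Int) (out : List (String × Int)) : Prop := out = calc_streaks_alt sequence
instance (sequence : List Int) (out : List (String × Int)) : Decidable (Spec_calc_streaks sequence out) := by unfold Spec_calc_streaks; infer_instance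

-- ===== CLAIM (what is proved, stated in full; the proofs are below) =====
def Claim_equal_calc_streaks : Prop := ∀ (sequence : List Int), Dom_calc_streaks sequence → Spec_calc_streaks sequence (calc_streaks sequence)

-- ===== LEMMAS AND PROOFS =====

-- in-order run decomposition, by recursion on the remaining input
def runsAux (k : Bool) (n : Int) : List Int → List (Bool × Int)
  | [] => [(k, n)]
  | x :: xs => if (x == 1) == k then runsAux k (n + 1) xs else (k, n) :: runsAux (x == 1) 1 xs

def maxT : List (Bool × Int) → Int
  | [] => 0
  | (b, n) :: r => if b then max n (maxT r) else maxT r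

def maxF : List (Bool × Int) → Int
  | [] => 0
  | (b, n) :: r => if b then maxF r else max n (maxF r)

lemma bStep_runsAux : ∀ (xs : List Int) (k : Bool) (n : Int) (acc : List (Bool × Int)),
    List.foldl bStep ((k, n) :: acc) xs = (runsAux k n xs).reverse ++ acc := by
  intro xs
  induction xs with
  | nil => intro k n acc; simp [runsAux]
  | cons x xs ih =>
    intro k n acc
    by_cases h : (x == 1) = k
    · simp [bStep, runsAux, h, ih]
    · have h' : ¬ (k == (x == 1)) = true := by
        cases k <;> cases hx : (x == 1) <;> simp_all
      simp [bStep, runsAux, h, h', ih]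

lemma runsAux_pos : ∀ (xs : List Int) (k : Bool) (n : Int), 1 ≤ n →
    ∀ p ∈ runsAux k n xs, 1 ≤ p.2 := by
  intro xs
  induction xs with
  | nil => intro k n hn p hp; simp [runsAux] at hp; simp [hp, hn]
  | cons x xs ih =>
    intro k n hn p hp
    by_cases h : (x == 1) = k
    · rw [show runsAux k n (x :: xs) = runsAux k (n + 1) xs by simp [runsAux, h]] at hp
      exact ih k (n + 1) (by omega) p hp
    · have hbe : ((x == 1) == k) = false := by
        cases k <;> cases hx : (x == 1) <;> simp_all
      rw [show runsAux k n (x :: xs) = (k, n) :: runsAux (x == 1) 1 xs by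
        simp [runsAux, hbe]] at hp
      rcases List.mem_cons.mp hp with hp | hp
      · simp [hp, hn]
      · exact ih (x == 1) 1 le_rfl p hp

lemma maxTF_nonneg : ∀ (r : List (Bool × Int)), 0 ≤ maxT r ∧ 0 ≤ maxF r := by
  intro r
  induction r with
  | nil => simp [maxT, maxF]
  | cons p r ih =>
    obtain ⟨b, n⟩ := p
    cases b <;> simp [maxT, maxF] <;> omega

lemma max_absorb {a b c : Int} (h : b ≤ c) : max (max a b) c = max a c := by
  rw [max_assoc, max_eq_right h]

lemma max_absorb2 {a b c : Int} (h : b ≤ a) : max a (max b c) = max a c := by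
  rw [← max_assoc, max_eq_left h]

lemma maxTF_ge : ∀ (xs : List Int) (k : Bool) (n : Int),
    (k = true → n ≤ maxT (runsAux k n xs)) ∧ (k = false → n ≤ maxF (runsAux k n xs)) := by
  intro xs
  induction xs with
  | nil =>
    intro k n
    cases k <;> simp [runsAux, maxT, maxF]
  | cons x xs ih =>
    intro k n
    by_cases h : (x == 1) = k
    · rw [show runsAux k n (x :: xs) = runsAux k (n + 1) xs by simp [runsAux, h]]
      constructor
      · intro hk; have := (ih k (n + 1)).1 hk; omega
      · intro hk; have := (ih k (n + 1)).2 hk; omega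
    · have hbe : ((x == 1) == k) = false := by
        cases k <;> cases hx : (x == 1) <;> simp_all
      rw [show runsAux k n (x :: xs) = (k, n) :: runsAux (x == 1) 1 xs by
        simp [runsAux, hbe]]
      cases k with
      | true =>
        refine ⟨fun _ => ?_, fun hk => absurd hk (by simp)⟩
        simp [maxT]
      | false =>
        refine ⟨fun hk => absurd hk (by simp), fun _ => ?_⟩
        simp [maxF]

-- foldl-max over nonneg elements equals max with base 0
lemma foldl_max_eq (t : List Int) : ∀ (x : Int), 0 ≤ x → (∀ y ∈ t, 0 ≤ y) →
    t.foldl max x = max x (t.foldr max 0) := by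
  induction t with
  | nil => intro x hx _; simp; omega
  | cons a t ih =>
    intro x hx hall
    have ha : 0 ≤ a := hall a (by simp)
    have := ih (max x a) (by omega) (fun y hy => hall y (by simp [hy]))
    simp only [List.foldl_cons, List.foldr_cons]
    omega

lemma max_getD_eq (l : List Int) (hl : ∀ y ∈ l, 0 ≤ y) :
    (PySem.List.max? l (fun y => y)).getD 0 = l.foldr max 0 := by
  cases l with
  | nil => simp [PySem.List.max?]
  | cons x t =>
    rw [PySem.List.max?_id_cons]
    have := foldl_max_eq t x (hl x (by simp)) (fun y hy => hl y (by simp [hy]))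
    simp only [Option.getD_some, List.foldr_cons]
    omega

lemma filterMap_maxT (r : List (Bool × Int)) :
    (r.filterMap (fun p => if p.1 then some p.2 else none)).foldr max 0 = maxT r := by
  induction r with
  | nil => rfl
  | cons p r ih =>
    obtain ⟨b, n⟩ := p
    cases b <;> simp [maxT, ih]

lemma filterMap_maxF (r : List (Bool × Int)) :
    (r.filterMap (fun p => if p.1 then none else some p.2)).foldr max 0 = maxF r := by
  induction r with
  | nil => rfl
  | cons p r ih =>
    obtain ⟨b, n⟩ := p
    cases b <;> simp [maxF, ih]

lemma bCollect_eval (r : List (Bool × Int)) (hpos : ∀ p ∈ r, 1 ≤ p.2) :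
    bCollect r = [("longest_success", maxT r), ("longest_failure", maxF r)] := by
  have hT : ∀ y ∈ r.filterMap (fun p => if p.1 then some p.2 else none), 0 ≤ y := by
    intro y hy
    simp only [List.mem_filterMap] at hy
    obtain ⟨p, hp, hpy⟩ := hy
    have := hpos p hp
    by_cases hb : p.1 = true <;> simp [hb] at hpy <;> omega
  have hF : ∀ y ∈ r.filterMap (fun p => if p.1 then none else some p.2), 0 ≤ y := by
    intro y hy
    simp only [List.mem_filterMap] at hy
    obtain ⟨p, hp, hpy⟩ := hy
    have := hpos p hp
    by_cases hb : p.1 = true <;> simp [hb] at hpy <;> omega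
  unfold bCollect
  rw [max_getD_eq _ hT, max_getD_eq _ hF, filterMap_maxT, filterMap_maxF]

lemma alt_eval (x : Int) (xs : List Int) :
    calc_streaks_alt (x :: xs) =
      [("longest_success", maxT (runsAux (x == 1) 1 xs)),
       ("longest_failure", maxF (runsAux (x == 1) 1 xs))] := by
  unfold calc_streaks_alt
  rw [show List.foldl bStep [] (x :: xs) = List.foldl bStep [((x == 1), 1)] xs from rfl,
      bStep_runsAux xs (x == 1) 1 []]
  simp only [List.append_nil, List.reverse_reverse]
  exact bCollect_eval _ (runsAux_pos xs (x == 1) 1 le_rfl)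

lemma main_loop : ∀ (xs : List Int) (k : Bool) (n ls lf : Int), 1 ≤ n → 0 ≤ ls → 0 ≤ lf →
    (k = true → n ≤ ls) → (k = false → n ≤ lf) →
    (List.foldl aStep ((if k then n else 0), (if k then 0 else n), ls, lf) xs).2.2
      = (max ls (maxT (runsAux k n xs)), max lf (maxF (runsAux k n xs))) := by
  intro xs
  induction xs with
  | nil =>
    intro k n ls lf hn hls hlf hkt hkf
    cases k
    · have := hkf rfl; simp [runsAux, maxT, maxF]; omega
    · have := hkt rfl; simp [runsAux, maxT, maxF]; omega
  | cons x xs ih =>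
    intro k n ls lf hn hls hlf hkt hkf
    cases k with
    | true =>
      have hls' : n ≤ ls := hkt rfl
      by_cases hx : (x == 1) = true
      · -- success run continues
        have hge := (maxTF_ge xs true (n + 1)).1 rfl
        have ih' : (List.foldl aStep (n + 1, 0, max ls (n + 1), lf) xs).2.2
            = (max (max ls (n + 1)) (maxT (runsAux true (n + 1) xs)),
               max lf (maxF (runsAux true (n + 1) xs))) :=
          ih true (n + 1) (max ls (n + 1)) lf (by omega) (by omega) hlf
            (fun _ => by omega) (by simp)
        have hstep : aStep (n, 0, ls, lf) x = (n + 1, 0, max ls (n + 1), lf) := by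
          simp [aStep, hx]
        have hruns : runsAux true n (x :: xs) = runsAux true (n + 1) xs := by
          simp [runsAux, hx]
        show (List.foldl aStep (n, 0, ls, lf) (x :: xs)).2.2
          = (max ls (maxT (runsAux true n (x :: xs))), max lf (maxF (runsAux true n (x :: xs))))
        rw [List.foldl_cons, hstep, hruns, ih', max_absorb hge]
      · -- boundary: success run ends, failure run of length 1 starts
        have hx' : (x == 1) = false := by simp_all
        have hge := (maxTF_ge xs false 1).2 rfl
        have ih' : (List.foldl aStep (0, 1, ls, max lf 1) xs).2.2
            = (max ls (maxT (runsAux false 1 xs)),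
               max (max lf 1) (maxF (runsAux false 1 xs))) :=
          ih false 1 ls (max lf 1) le_rfl hls (by omega) (by simp) (fun _ => by omega)
        have hstep : aStep (n, 0, ls, lf) x = (0, 1, ls, max lf 1) := by
          simp [aStep, hx]
        have hruns : runsAux true n (x :: xs) = (true, n) :: runsAux false 1 xs := by
          simp [runsAux, hx']
        have hT : maxT ((true, n) :: runsAux false 1 xs) = max n (maxT (runsAux false 1 xs)) := rfl
        have hF : maxF ((true, n) :: runsAux false 1 xs) = maxF (runsAux false 1 xs) := rfl
        show (List.foldl aStep (n, 0, ls, lf) (x :: xs)).2.2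
          = (max ls (maxT (runsAux true n (x :: xs))), max lf (maxF (runsAux true n (x :: xs))))
        rw [List.foldl_cons, hstep, hruns, hT, hF, ih', max_absorb hge, max_absorb2 hls']
    | false =>
      have hlf' : n ≤ lf := hkf rfl
      by_cases hx : (x == 1) = true
      · -- boundary: failure run ends, success run of length 1 starts
        have hge := (maxTF_ge xs true 1).1 rfl
        have ih' : (List.foldl aStep (1, 0, max ls 1, lf) xs).2.2
            = (max (max ls 1) (maxT (runsAux true 1 xs)),
               max lf (maxF (runsAux true 1 xs))) :=
          ih true 1 (max ls 1) lf le_rfl (by omega) hlf (fun _ => by omega) (by simp)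
        have hstep : aStep (0, n, ls, lf) x = (1, 0, max ls 1, lf) := by
          simp [aStep, hx]
        have hruns : runsAux false n (x :: xs) = (false, n) :: runsAux true 1 xs := by
          simp [runsAux, hx]
        have hT : maxT ((false, n) :: runsAux true 1 xs) = maxT (runsAux true 1 xs) := rfl
        have hF : maxF ((false, n) :: runsAux true 1 xs) = max n (maxF (runsAux true 1 xs)) := rfl
        show (List.foldl aStep (0, n, ls, lf) (x :: xs)).2.2
          = (max ls (maxT (runsAux false n (x :: xs))), max lf (maxF (runsAux false n (x :: xs))))
        rw [List.foldl_cons, hstep, hruns, hT, hF, ih', max_absorb hge, max_absorb2 hlf']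
      · -- failure run continues
        have hx' : (x == 1) = false := by simp_all
        have hge := (maxTF_ge xs false (n + 1)).2 rfl
        have ih' : (List.foldl aStep (0, n + 1, ls, max lf (n + 1)) xs).2.2
            = (max ls (maxT (runsAux false (n + 1) xs)),
               max (max lf (n + 1)) (maxF (runsAux false (n + 1) xs))) :=
          ih false (n + 1) ls (max lf (n + 1)) (by omega) hls (by omega)
            (by simp) (fun _ => by omega)
        have hstep : aStep (0, n, ls, lf) x = (0, n + 1, ls, max lf (n + 1)) := by
          simp [aStep, hx]
        have hruns : runsAux false n (x :: xs) = runsAux false (n + 1) xs := by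
          simp [runsAux, hx']
        show (List.foldl aStep (0, n, ls, lf) (x :: xs)).2.2
          = (max ls (maxT (runsAux false n (x :: xs))), max lf (maxF (runsAux false n (x :: xs))))
        rw [List.foldl_cons, hstep, hruns, ih', max_absorb hge]

-- ===== VERDICT (by name: the statement is the Claim_ definition above) =====
theorem calc_streaks_spec : Claim_equal_calc_streaks := by
  intro sequence _
  unfold Spec_calc_streaks
  cases sequence with
  | nil => decide
  | cons x xs =>
    rw [alt_eval]
    unfold calc_streaks
    by_cases hx : (x == 1) = true
    · have hge := (maxTF_ge xs true 1).1 rfl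
      have hnn := (maxTF_nonneg (runsAux true 1 xs)).2
      have hmain : (List.foldl aStep (1, 0, 1, 0) xs).2.2
          = (max 1 (maxT (runsAux true 1 xs)), max 0 (maxF (runsAux true 1 xs))) :=
        main_loop xs true 1 1 0 le_rfl (by omega) le_rfl (fun _ => le_rfl) (by simp)
      have hstep : aStep (0, 0, 0, 0) x = (1, 0, 1, 0) := by
        simp [aStep, hx]
      rw [hx]
      show [("longest_success", (List.foldl aStep (aStep (0, 0, 0, 0) x) xs).2.2.1),
            ("longest_failure", (List.foldl aStep (aStep (0, 0, 0, 0) x) xs).2.2.2)]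
        = [("longest_success", maxT (runsAux true 1 xs)),
           ("longest_failure", maxF (runsAux true 1 xs))]
      rw [hstep, hmain, max_eq_right hge, max_eq_right hnn]
    · have hx' : (x == 1) = false := by simp_all
      have hge := (maxTF_ge xs false 1).2 rfl
      have hnn := (maxTF_nonneg (runsAux false 1 xs)).1
      have hmain : (List.foldl aStep (0, 1, 0, 1) xs).2.2
          = (max 0 (maxT (runsAux false 1 xs)), max 1 (maxF (runsAux false 1 xs))) :=
        main_loop xs false 1 0 1 le_rfl le_rfl (by omega) (by simp) (fun _ => le_rfl)
      have hstep : aStep (0, 0, 0, 0) x = (0, 1, 0, 1) := by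
        simp [aStep, hx]
      rw [hx']
      show [("longest_success", (List.foldl aStep (aStep (0, 0, 0, 0) x) xs).2.2.1),
            ("longest_failure", (List.foldl aStep (aStep (0, 0, 0, 0) x) xs).2.2.2)]
        = [("longest_success", maxT (runsAux false 1 xs)),
           ("longest_failure", maxF (runsAux false 1 xs))]
      rw [hstep, hmain, max_eq_right hge, max_eq_right hnn]
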